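-- pv_equiv track=rewrite | github.com/lorebianchi98/FG-OVD | captions_generation/question_remake.py | remove_ok_captions
-- ===== SOURCE A (Python) =====
-- def remove_ok_captions(objs):
--     new_objs = []
--     ok = []
--     for obj in objs:
--         if obj['new_prompt_id'] != -1:
--             new_objs += [obj]
--         else:
--             ok += [obj]
--     return new_objs, ok
-- ===== SOURCE B (Python) =====
-- def remove_ok_captions(objs):
--     # Structural recursion: split off the head, partition the tail recursively,
--     # then prepend the head to the proper side (output built back-to-front).
--     if not objs:
--         return [], []
--     head = objs[0]
--     new_objs, ok = remove_ok_captions(objs[1:])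
--     if head['new_prompt_id'] != -1:
--         return [head] + new_objs, ok
--     return new_objs, [head] + ok
-- ===== Notes on version B (the rewrite author's own statement) =====
-- stated objective: alternative
-- what changed: Replaces A's single forward loop that appends to two growing accumulator lists with a structural recursion on the list that partitions the tail first and then prepends the head to the proper side, building both outputs back-to-front with no accumulators.
import Mathlib
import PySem

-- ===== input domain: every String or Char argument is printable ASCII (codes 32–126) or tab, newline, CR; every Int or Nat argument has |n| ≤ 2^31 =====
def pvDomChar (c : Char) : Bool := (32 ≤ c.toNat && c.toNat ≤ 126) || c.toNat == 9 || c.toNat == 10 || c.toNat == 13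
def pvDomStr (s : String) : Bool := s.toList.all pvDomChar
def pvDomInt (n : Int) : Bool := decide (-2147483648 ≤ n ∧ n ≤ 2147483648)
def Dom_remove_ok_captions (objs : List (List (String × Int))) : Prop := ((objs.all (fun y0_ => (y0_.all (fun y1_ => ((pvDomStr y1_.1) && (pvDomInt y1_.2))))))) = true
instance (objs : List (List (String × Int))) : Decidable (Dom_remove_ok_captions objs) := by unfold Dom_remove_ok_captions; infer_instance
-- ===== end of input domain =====

-- B replaces A's accumulator loop with a structural recursion that partitions the tail and prepends the head (same outputs).


-- ===== PORT A =====
-- obj['new_prompt_id'] : first-match lookup in the association list (KeyError = none, excluded by Pre_)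
def pvNpid (obj : List (String × Int)) : Int :=
  match obj.find? (fun p => p.1 == "new_prompt_id") with
  | some p => p.2
  | none => 0

-- single loop accumulating the two output lists, exactly as A
def remove_ok_captions (objs : List (List (String × Int))) : (List (List (String × Int))) × (List (List (String × Int))) :=
  objs.foldl (fun st obj =>
    if pvNpid obj ≠ -1 then (st.1 ++ [obj], st.2) else (st.1, st.2 ++ [obj]))
    ([], [])

-- ===== PORT B =====
-- structural recursion: partition the tail, then prepend the head to the proper side (as Source B)
def remove_ok_captions_alt (objs : List (List (String × Int))) : (List (List (String × Int))) × (List (List (String × Int))) :=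
  match objs with
  | [] => ([], [])
  | head :: rest =>
    let p := remove_ok_captions_alt rest
    if pvNpid head ≠ -1 then (head :: p.1, p.2) else (p.1, head :: p.2)

-- ===== PRECONDITION & SPEC =====
-- Pre_ excludes inputs where some obj lacks the key 'new_prompt_id': A raises KeyError there.
def Pre_remove_ok_captions (objs : List (List (String × Int))) : Prop :=
  (objs.all (fun obj => obj.any (fun p => p.1 == "new_prompt_id"))) = true
instance (objs : List (List (String × Int))) : Decidable (Pre_remove_ok_captions objs) := by unfold Pre_remove_ok_captions; infer_instance
def pvWitness_remove_ok_captions : (List (List (String × Int))) := [[("new_prompt_id", -1)], [("new_prompt_id", 3)]]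
def Spec_remove_ok_captions (objs : List (List (String × Int))) (out : (List (List (String × Int))) × (List (List (String × Int)))) : Prop := out = remove_ok_captions_alt objs
instance (objs : List (List (String × Int))) (out : (List (List (String × Int))) × (List (List (String × Int)))) : Decidable (Spec_remove_ok_captions objs out) := by unfold Spec_remove_ok_captions; infer_instance

-- ===== CLAIM =====
def Claim_equal_remove_ok_captions : Prop := ∀ (objs : List (List (String × Int))), Dom_remove_ok_captions objs → Pre_remove_ok_captions objs → Spec_remove_ok_captions objs (remove_ok_captions objs)

-- ===== LEMMAS AND PROOFS =====
-- loop invariant: A's fold started from accumulators (a, b) appends B's recursive partition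
theorem remove_ok_captions_foldl (objs : List (List (String × Int)))
    (a b : List (List (String × Int))) :
    objs.foldl (fun st obj =>
      if pvNpid obj ≠ -1 then (st.1 ++ [obj], st.2) else (st.1, st.2 ++ [obj])) (a, b)
    = (a ++ (remove_ok_captions_alt objs).1, b ++ (remove_ok_captions_alt objs).2) := by
  induction objs generalizing a b with
  | nil => simp [remove_ok_captions_alt]
  | cons o os ih =>
    by_cases h : pvNpid o = -1
    · rw [List.foldl_cons, if_neg (by simp [h]), ih]
      simp [remove_ok_captions_alt, h]
    · rw [List.foldl_cons, if_pos (by simp [h]), ih]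
      simp [remove_ok_captions_alt, h]

-- ===== VERDICT =====
theorem remove_ok_captions_spec : Claim_equal_remove_ok_captions := by
  intro objs _ _
  unfold Spec_remove_ok_captions remove_ok_captions
  rw [remove_ok_captions_foldl]
  simp
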